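-- pv_equiv track=rewrite | github.com/krzysztof-turowski/string-algorithms | compression/lpf.py | compute_cis_lpf_no_stack
-- ===== SOURCE A (Python) =====
-- def compute_cis_lpf_no_stack(n, SA, LCP):
--   SA += [-1]
--   LCP += [0]
--   LPF = [-1] * (n + 1)
--
--   def update(i, t):
--     if SA[i] < SA[t]:
--       LPF[SA[t]] = max(LCP[t], LCP[i])
--       LCP[i] = min(LCP[t], LCP[i])
--       return i
--     if SA[i] > SA[t] and LCP[i] <= LCP[t]:
--       LPF[SA[t]] = LCP[t]
--       return i
--     return None
--
--   def rec(i, t):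
--     return update(i, t) or rec(rec(i + 1, i), t)
--
--   c = 1
--   while c <= n:
--     c = rec(c + 1, c)
--
--   return LPF
-- ===== SOURCE B (Python) =====
-- def compute_cis_lpf_no_stack(n, SA, LCP):
--   SA += [-1]
--   LCP += [0]
--   LPF = [-1] * (n + 1)
--   stack = [1]
--   for i in range(2, n + 2):
--     while stack:
--       t = stack[-1]
--       if SA[i] < SA[t]:
--         LPF[SA[t]] = max(LCP[t], LCP[i])
--         LCP[i] = min(LCP[t], LCP[i])
--         stack.pop()
--       elif SA[i] > SA[t] and LCP[i] <= LCP[t]: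
--         LPF[SA[t]] = LCP[t]
--         stack.pop()
--       else:
--         break
--     stack.append(i)
--   return LPF
-- ===== Notes on version B (the rewrite author's own statement) =====
-- stated objective: simpler
-- what changed: The mutually nested recursion rec(i,t)=update(i,t) or rec(rec(i+1,i),t) plus the outer while loop are replaced by a single explicit pass i=2..n+1 over the suffix array maintaining a stack of pending indices (the defunctionalized recursion), popping while the update condition holds and pushing i; no recursion, no or-truthiness trick, and it also avoids Python's recursion-depth limit.
-- outside the precondition, e.g. on compute_cis_lpf_no_stack(1, [1, 1, 1], [1, 1, -1]): A returns [-1, 1], B returns [-1, -1]; on compute_cis_lpf_no_stack(1, [0, -2], [0, 0]): A returns [0, -1], B returns [0, -1]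
import Mathlib
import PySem

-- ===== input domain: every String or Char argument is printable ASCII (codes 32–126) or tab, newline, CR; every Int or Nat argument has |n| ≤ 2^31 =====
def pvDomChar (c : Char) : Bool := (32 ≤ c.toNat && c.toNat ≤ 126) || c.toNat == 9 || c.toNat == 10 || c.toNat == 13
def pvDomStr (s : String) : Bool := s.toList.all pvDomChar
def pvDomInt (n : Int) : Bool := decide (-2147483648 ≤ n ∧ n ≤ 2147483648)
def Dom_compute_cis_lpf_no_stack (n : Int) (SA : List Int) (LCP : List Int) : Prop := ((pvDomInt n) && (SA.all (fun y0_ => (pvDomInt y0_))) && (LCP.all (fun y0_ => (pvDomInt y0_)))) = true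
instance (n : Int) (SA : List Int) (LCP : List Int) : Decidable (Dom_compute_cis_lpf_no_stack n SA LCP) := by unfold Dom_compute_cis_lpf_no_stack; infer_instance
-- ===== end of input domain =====

-- B replaces A's nested recursion (rec(i,t) = update(i,t) or rec(rec(i+1,i),t)) by one explicit
-- left-to-right pass with a stack of pending indices (objective: simpler — no recursion, no
-- or-truthiness). Both Pythons mutate SA and LCP in place identically (append of the sentinel and
-- the LCP[i]=min updates); the equivalence proved here is about the RETURN value.

-- ===== PORT A =====
-- A's inner helper `update(i, t)`: returns (update's return value, new LCP, new LPF);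
-- none = IndexError on one of the list accesses.
def pvUpdate (SA lcp lpf : List Int) (i t : Int) : Option (Option Int × List Int × List Int) :=
  match PySem.List.pyGet? SA i, PySem.List.pyGet? SA t with
  | some sai, some sat =>
    if sai < sat then
      match PySem.List.pyGet? lcp t, PySem.List.pyGet? lcp i with
      | some lt, some li =>
        match PySem.List.pySet? lpf sat (max lt li), PySem.List.pySet? lcp i (min lt li) with
        | some lpf2, some lcp2 => some (some i, lcp2, lpf2)
        | _, _ => none
      | _, _ => none
    else if sat < sai then
      match PySem.List.pyGet? lcp i, PySem.List.pyGet? lcp t with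
      | some li, some lt =>
        if li ≤ lt then
          match PySem.List.pySet? lpf sat lt with
          | some lpf2 => some (some i, lcp, lpf2)
          | none => none
        else some (none, lcp, lpf)
      | _, _ => none
    else some (none, lcp, lpf)
  | _, _ => none

-- A's `rec(i, t)`; `update(i, t) or rec(rec(i+1, i), t)` with Python truthiness (0 is falsy).
-- Fuel is only a totality guard; inside Pre_ it never runs out (proved below).
def pvRec (SA : List Int) : Nat → Int → Int → List Int → List Int → Option (Int × List Int × List Int)
  | 0, _, _, _, _ => none
  | f+1, i, t, lcp, lpf =>
    match pvUpdate SA lcp lpf i t with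
    | none => none
    | some (some j, lcp1, lpf1) =>
      if j = 0 then
        match pvRec SA f (i+1) i lcp1 lpf1 with
        | none => none
        | some (k, lcp2, lpf2) => pvRec SA f k t lcp2 lpf2
      else some (j, lcp1, lpf1)
    | some (none, lcp1, lpf1) =>
      match pvRec SA f (i+1) i lcp1 lpf1 with
      | none => none
      | some (k, lcp2, lpf2) => pvRec SA f k t lcp2 lpf2

-- A's `while c <= n: c = rec(c + 1, c)` loop.
def pvWhile (n : Int) (SA : List Int) : Nat → Int → List Int → List Int → Option (List Int)
  | 0, _, _, _ => none
  | f+1, c, lcp, lpf =>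
    if c ≤ n then
      match pvRec SA (n + 3).toNat (c + 1) c lcp lpf with
      | none => none
      | some (c', lcp', lpf') => pvWhile n SA f c' lcp' lpf'
    else some lpf

def compute_cis_lpf_no_stack (n : Int) (SA : List Int) (LCP : List Int) : List Int :=
  let SA2 := SA ++ [-1]
  let lcp0 := LCP ++ [0]
  let lpf0 := List.replicate (n + 1).toNat (-1)
  match pvWhile n SA2 (n + 2).toNat 1 lcp0 lpf0 with
  | some r => r
  | none => lpf0

-- ===== PORT B =====
-- B's inner `while stack:` pop loop at index i (top of stack = head); none = IndexError.
def pvPop (SA : List Int) (i : Int) : List Int → List Int → List Int → Option (List Int × List Int × List Int)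
  | [], lcp, lpf => some ([], lcp, lpf)
  | t :: rest, lcp, lpf =>
    match PySem.List.pyGet? SA i, PySem.List.pyGet? SA t with
    | some sai, some sat =>
      if sai < sat then
        match PySem.List.pyGet? lcp t, PySem.List.pyGet? lcp i with
        | some lt, some li =>
          match PySem.List.pySet? lpf sat (max lt li), PySem.List.pySet? lcp i (min lt li) with
          | some lpf2, some lcp2 => pvPop SA i rest lcp2 lpf2
          | _, _ => none
        | _, _ => none
      else if sat < sai then
        match PySem.List.pyGet? lcp i, PySem.List.pyGet? lcp t with
        | some li, some lt =>
          if li ≤ lt then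
            match PySem.List.pySet? lpf sat lt with
            | some lpf2 => pvPop SA i rest lcp lpf2
            | none => none
          else some (t :: rest, lcp, lpf)
        | _, _ => none
      else some (t :: rest, lcp, lpf)
    | _, _ => none

-- B's `for i in range(2, n + 2):` loop; state = (stack, LCP, LPF).
def pvFor (SA : List Int) : List Int → List Int → List Int → List Int → Option (List Int × List Int × List Int)
  | [], stack, lcp, lpf => some (stack, lcp, lpf)
  | i :: rest, stack, lcp, lpf =>
    match pvPop SA i stack lcp lpf with
    | none => none
    | some (stack', lcp', lpf') => pvFor SA rest (i :: stack') lcp' lpf'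

def compute_cis_lpf_no_stack_alt (n : Int) (SA : List Int) (LCP : List Int) : List Int :=
  let SA2 := SA ++ [-1]
  let lcp0 := LCP ++ [0]
  let lpf0 := List.replicate (n + 1).toNat (-1)
  match pvFor SA2 (PySem.List.pyRange 2 (n + 2) 1) [1] lcp0 lpf0 with
  | some (_, _, r) => r
  | none => lpf0

-- ===== PRECONDITION & SPEC =====
-- Pre_ admits every n ≤ 0 (the loop never runs) and, for n ≥ 0, the well-formed SA/LCP shape of
-- the repository (SA of length n+1 with position 0 a placeholder and SA[1..n] ranks in [0, n],
-- LCP of length at least n+1); outside it A's negative-index wraparound, reads past the intended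
-- sentinel, IndexError and RecursionError are accidents of A's implementation.
def Pre_compute_cis_lpf_no_stack (n : Int) (SA : List Int) (LCP : List Int) : Prop :=
  n ≤ 0 ∨ (0 ≤ n ∧ (SA.length : Int) = n + 1 ∧ n + 1 ≤ (LCP.length : Int) ∧
    ∀ x ∈ SA.drop 1, 0 ≤ x ∧ x ≤ n)
instance (n : Int) (SA : List Int) (LCP : List Int) : Decidable (Pre_compute_cis_lpf_no_stack n SA LCP) := by
  unfold Pre_compute_cis_lpf_no_stack; infer_instance

def pvWitness_compute_cis_lpf_no_stack : Int × List Int × List Int := (2, ([0, 2, 1], [0, 0, 1]))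

def Spec_compute_cis_lpf_no_stack (n : Int) (SA : List Int) (LCP : List Int) (out : List Int) : Prop := out = compute_cis_lpf_no_stack_alt n SA LCP
instance (n : Int) (SA : List Int) (LCP : List Int) (out : List Int) : Decidable (Spec_compute_cis_lpf_no_stack n SA LCP out) := by unfold Spec_compute_cis_lpf_no_stack; infer_instance

-- ===== CLAIM (what is proved, stated in full; the proofs are below) =====
def Claim_equal_compute_cis_lpf_no_stack : Prop := ∀ (n : Int) (SA : List Int) (LCP : List Int), Dom_compute_cis_lpf_no_stack n SA LCP → Pre_compute_cis_lpf_no_stack n SA LCP → Spec_compute_cis_lpf_no_stack n SA LCP (compute_cis_lpf_no_stack n SA LCP)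

-- ===== LEMMAS AND PROOFS =====

-- In-range list accesses succeed.
theorem pvGet_ok {xs : List Int} {i : Int} (h0 : 0 ≤ i) (h1 : i < (xs.length : Int)) :
    ∃ v, PySem.List.pyGet? xs i = some v := by
  exact ⟨_, PySem.List.pyGet?_eq_some_getElem xs h0 h1⟩

theorem pvSet_ok {xs : List Int} {i : Int} (v : Int) (h0 : 0 ≤ i) (h1 : i < (xs.length : Int)) :
    ∃ ys, PySem.List.pySet? xs i v = some ys ∧ ys.length = xs.length := by
  cases h : PySem.List.pySet? xs i v with
  | none =>
    rw [PySem.List.pySet?_eq_none_iff] at h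
    exact absurd ⟨by omega, h1⟩ h
  | some ys =>
    refine ⟨ys, rfl, ?_⟩
    have hys : PySem.List.pySetD xs i v = ys := by simp [PySem.List.pySetD, h]
    rw [← hys, PySem.List.length_pySetD]

-- `update` always returns i when it returns.
theorem upd_some_idx {SA lcp lpf : List Int} {i t j : Int} {l p : List Int}
    (h : pvUpdate SA lcp lpf i t = some (some j, l, p)) : j = i := by
  unfold pvUpdate at h
  repeat' split at h
  all_goals simp_all

-- `update` succeeds and preserves the state shape on well-formed inputs, and always pops at the sentinel.
theorem upd_ok (n : Int) (SA lcp lpf : List Int) (i t : Int)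
    (hlast : PySem.List.pyGet? SA (n + 1) = some (-1))
    (hrng : ∀ u : Int, 1 ≤ u → u ≤ n → ∃ v, PySem.List.pyGet? SA u = some v ∧ 0 ≤ v ∧ v ≤ n)
    (hlcp : n + 2 ≤ (lcp.length : Int)) (hlpf : (lpf.length : Int) = n + 1)
    (hi : 1 ≤ i) (hi2 : i ≤ n + 1) (ht : 1 ≤ t) (ht2 : t ≤ n) :
    ∃ r lcp' lpf', pvUpdate SA lcp lpf i t = some (r, lcp', lpf') ∧
      lcp'.length = lcp.length ∧ lpf'.length = lpf.length ∧
      (r = some i ∨ (r = none ∧ lcp' = lcp ∧ lpf' = lpf)) ∧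
      (i = n + 1 → r = some i) := by
  obtain ⟨sat, hsat, hsat0, hsatn⟩ := hrng t ht ht2
  obtain ⟨sai, hsai, hsent⟩ :
      ∃ sai, PySem.List.pyGet? SA i = some sai ∧ (i = n + 1 → sai = -1) := by
    rcases eq_or_lt_of_le hi2 with h | h
    · exact ⟨-1, by rw [h]; exact hlast, fun _ => rfl⟩
    · obtain ⟨v, hv, _, _⟩ := hrng i hi (by omega)
      exact ⟨v, hv, fun he => by omega⟩
  obtain ⟨lt, hlt⟩ := pvGet_ok (xs := lcp) (i := t) (by omega) (by omega)
  obtain ⟨li, hli⟩ := pvGet_ok (xs := lcp) (i := i) (by omega) (by omega)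
  obtain ⟨lpf2, hlpf2, hlpf2len⟩ := pvSet_ok (xs := lpf) (i := sat) (max lt li) hsat0 (by omega)
  obtain ⟨lcp2, hlcp2, hlcp2len⟩ := pvSet_ok (xs := lcp) (i := i) (min lt li) (by omega) (by omega)
  obtain ⟨lpf3, hlpf3, hlpf3len⟩ := pvSet_ok (xs := lpf) (i := sat) lt hsat0 (by omega)
  unfold pvUpdate
  simp only [hsai, hsat]
  split_ifs with h1 h2
  · simp only [hlt, hli, hlpf2, hlcp2]
    exact ⟨some i, lcp2, lpf2, rfl, hlcp2len, hlpf2len, Or.inl rfl, fun _ => rfl⟩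
  · simp only [hli, hlt, hlpf3]
    split_ifs with h3
    · exact ⟨some i, lcp, lpf3, rfl, rfl, hlpf3len, Or.inl rfl, fun _ => rfl⟩
    · exact ⟨none, lcp, lpf, rfl, rfl, rfl, Or.inr ⟨rfl, rfl, rfl⟩,
        fun he => absurd (by rw [hsent he]; omega : sai < sat) h1⟩
  · exact ⟨none, lcp, lpf, rfl, rfl, rfl, Or.inr ⟨rfl, rfl, rfl⟩,
      fun he => absurd (by rw [hsent he]; omega : sai < sat) h1⟩

-- The defunctionalized machine for A's recursion: stack of pending `t`s, head = innermost.
def pvM (SA : List Int) : Nat → Int → List Int → List Int → List Int → Option (Int × List Int × List Int)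
  | 0, _, _, _, _ => none
  | f+1, i, stack, lcp, lpf =>
    match stack with
    | [] => some (i, lcp, lpf)
    | t :: r =>
      match pvUpdate SA lcp lpf i t with
      | none => none
      | some (some _, lcp', lpf') => pvM SA f i r lcp' lpf'
      | some (none, lcp', lpf') => pvM SA f (i+1) (i :: t :: r) lcp' lpf'

theorem pvM_append {SA : List Int} : ∀ (g1 : Nat) (i : Int) (s1 : List Int) (lcp lpf : List Int)
    (k : Int) (l2 p2 : List Int), pvM SA g1 i s1 lcp lpf = some (k, l2, p2) →
    ∀ (g2 : Nat) (s2 : List Int) (j : Int) (l3 p3 : List Int), pvM SA g2 k s2 l2 p2 = some (j, l3, p3) →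
    ∃ g, pvM SA g i (s1 ++ s2) lcp lpf = some (j, l3, p3) := by
  intro g1
  induction g1 with
  | zero => intro i s1 lcp lpf k l2 p2 h; simp [pvM] at h
  | succ g ih =>
    intro i s1 lcp lpf k l2 p2 h g2 s2 j l3 p3 h2
    cases s1 with
    | nil =>
      simp only [pvM] at h
      obtain ⟨rfl, rfl, rfl⟩ : i = k ∧ lcp = l2 ∧ lpf = p2 := by
        cases h; exact ⟨rfl, rfl, rfl⟩
      exact ⟨g2, h2⟩
    | cons t r =>
      simp only [pvM] at h
      cases hu : pvUpdate SA lcp lpf i t with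
      | none => simp [hu] at h
      | some res =>
        obtain ⟨ru, lcp1, lpf1⟩ := res
        cases ru with
        | some j0 =>
          simp only [hu] at h
          obtain ⟨g3, hg3⟩ := ih i r lcp1 lpf1 k l2 p2 h g2 s2 j l3 p3 h2
          exact ⟨g3 + 1, by simp only [pvM, List.cons_append, hu]; exact hg3⟩
        | none =>
          simp only [hu] at h
          obtain ⟨g3, hg3⟩ := ih (i+1) (i :: t :: r) lcp1 lpf1 k l2 p2 h g2 s2 j l3 p3 h2
          exact ⟨g3 + 1, by simp only [pvM, List.cons_append, hu]; exact hg3⟩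

theorem pvRec_toM {SA : List Int} : ∀ (f : Nat) (i t : Int) (lcp lpf : List Int)
    (j : Int) (l p : List Int), 1 ≤ i → pvRec SA f i t lcp lpf = some (j, l, p) →
    i ≤ j ∧ ∃ g, pvM SA g i [t] lcp lpf = some (j, l, p) := by
  intro f
  induction f with
  | zero => intro i t lcp lpf j l p _ h; simp [pvRec] at h
  | succ f ih =>
    intro i t lcp lpf j l p hi h
    simp only [pvRec] at h
    cases hu : pvUpdate SA lcp lpf i t with
    | none => simp [hu] at h
    | some res =>
      obtain ⟨ru, lcp1, lpf1⟩ := res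
      cases ru with
      | some j0 =>
        simp only [hu] at h
        have hj0 : j0 = i := upd_some_idx hu
        rw [if_neg (by omega : ¬ j0 = 0)] at h
        obtain ⟨rfl, rfl, rfl⟩ : j0 = j ∧ lcp1 = l ∧ lpf1 = p := by
          cases h; exact ⟨rfl, rfl, rfl⟩
        refine ⟨by omega, 2, ?_⟩
        simp only [pvM, hu, hj0]
      | none =>
        simp only [hu] at h
        cases hr1 : pvRec SA f (i+1) i lcp1 lpf1 with
        | none => simp [hr1] at h
        | some res2 =>
          obtain ⟨k, lcp2, lpf2⟩ := res2
          simp only [hr1] at h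
          obtain ⟨hik, g1, hg1⟩ := ih (i+1) i lcp1 lpf1 k lcp2 lpf2 (by omega) hr1
          obtain ⟨hkj, g2, hg2⟩ := ih k t lcp2 lpf2 j l p (by omega) h
          obtain ⟨g3, hg3⟩ := pvM_append g1 (i+1) [i] lcp1 lpf1 k lcp2 lpf2 hg1 g2 [t] j l p hg2
          refine ⟨by omega, g3 + 1, ?_⟩
          simp only [pvM, hu]
          simpa using hg3

-- totality of A's recursion on well-formed inputs, with the invariants the gluing needs.
theorem pvRec_total (n : Int) (SA : List Int)
    (hlast : PySem.List.pyGet? SA (n + 1) = some (-1))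
    (hrng : ∀ u : Int, 1 ≤ u → u ≤ n → ∃ v, PySem.List.pyGet? SA u = some v ∧ 0 ≤ v ∧ v ≤ n) :
    ∀ (f : Nat) (i t : Int) (lcp lpf : List Int), (n + 3 - i).toNat ≤ f →
    n + 2 ≤ (lcp.length : Int) → (lpf.length : Int) = n + 1 →
    1 ≤ i → i ≤ n + 1 → 1 ≤ t → t ≤ n →
    ∃ j l p, pvRec SA f i t lcp lpf = some (j, l, p) ∧ i ≤ j ∧ j ≤ n + 1 ∧
      l.length = lcp.length ∧ p.length = lpf.length := by
  intro f
  induction f with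
  | zero => intro i t lcp lpf hf _ _ hi hi2 _ _; omega
  | succ f ih =>
    intro i t lcp lpf hf hlcp hlpf hi hi2 ht ht2
    obtain ⟨r, lcp1, lpf1, hu, hl1, hp1, hcase, hsent⟩ :=
      upd_ok n SA lcp lpf i t hlast hrng hlcp hlpf hi hi2 ht ht2
    rcases hcase with rfl | ⟨rfl, heq1, heq2⟩
    · refine ⟨i, lcp1, lpf1, ?_, le_refl i, hi2, hl1, hp1⟩
      simp only [pvRec, hu]
      rw [if_neg (by omega : ¬ i = 0)]
    · rw [heq1, heq2] at hu
      have hin : i ≤ n := by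
        by_contra hc
        have : i = n + 1 := by omega
        cases (hsent this)
      obtain ⟨k, l2, p2, hr1, hik, hk2, hll2, hpp2⟩ :=
        ih (i+1) i lcp lpf (by omega) hlcp hlpf (by omega) (by omega) (by omega) (by omega)
      obtain ⟨j, l3, p3, hr2, hkj, hj2, hll3, hpp3⟩ :=
        ih k t l2 p2 (by omega) (by rw [hll2]; exact hlcp) (by rw [hpp2]; exact hlpf)
          (by omega) hk2 ht ht2
      refine ⟨j, l3, p3, ?_, by omega, hj2, by omega, by omega⟩
      simp only [pvRec, hu, hr1]
      exact hr2

-- one step of B's pop loop is exactly `update`.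
theorem pvPop_step {SA : List Int} (i t : Int) (rest lcp lpf : List Int) :
    pvPop SA i (t :: rest) lcp lpf =
      match pvUpdate SA lcp lpf i t with
      | none => none
      | some (some _, l, p) => pvPop SA i rest l p
      | some (none, _, _) => some (t :: rest, lcp, lpf) := by
  cases h1 : PySem.List.pyGet? SA i with
  | none => simp only [pvPop, pvUpdate, h1]
  | some sai =>
    cases h2 : PySem.List.pyGet? SA t with
    | none => simp only [pvPop, pvUpdate, h1, h2]
    | some sat =>
      by_cases hc1 : sai < sat
      · cases h3 : PySem.List.pyGet? lcp t with
        | none => simp only [pvPop, pvUpdate, h1, h2, h3, if_pos hc1]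
        | some lt =>
          cases h4 : PySem.List.pyGet? lcp i with
          | none => simp only [pvPop, pvUpdate, h1, h2, h3, h4, if_pos hc1]
          | some li =>
            cases h5 : PySem.List.pySet? lpf sat (max lt li) with
            | none =>
              cases h6 : PySem.List.pySet? lcp i (min lt li) <;>
                simp only [pvPop, pvUpdate, h1, h2, h3, h4, h5, h6, if_pos hc1]
            | some lpf2 =>
              cases h6 : PySem.List.pySet? lcp i (min lt li) <;>
                simp only [pvPop, pvUpdate, h1, h2, h3, h4, h5, h6, if_pos hc1]
      · by_cases hc2 : sat < sai
        · cases h3 : PySem.List.pyGet? lcp i with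
          | none => simp only [pvPop, pvUpdate, h1, h2, h3, if_neg hc1, if_pos hc2]
          | some li =>
            cases h4 : PySem.List.pyGet? lcp t with
            | none => simp only [pvPop, pvUpdate, h1, h2, h3, h4, if_neg hc1, if_pos hc2]
            | some lt =>
              by_cases hc3 : li ≤ lt
              · cases h5 : PySem.List.pySet? lpf sat lt <;>
                  simp only [pvPop, pvUpdate, h1, h2, h3, h4, h5, if_neg hc1, if_pos hc2, if_pos hc3]
              · simp only [pvPop, pvUpdate, h1, h2, h3, h4, if_neg hc1, if_pos hc2, if_neg hc3]
        · simp only [pvPop, pvUpdate, h1, h2, if_neg hc1, if_neg hc2]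

-- the machine run from (i, stack) is B's pass from index i, landing at index j with an empty stack.
theorem pvM_toB (n : Int) (SA : List Int)
    (hlast : PySem.List.pyGet? SA (n + 1) = some (-1))
    (hrng : ∀ u : Int, 1 ≤ u → u ≤ n → ∃ v, PySem.List.pyGet? SA u = some v ∧ 0 ≤ v ∧ v ≤ n) :
    ∀ (g : Nat) (i : Int) (stack lcp lpf : List Int) (j : Int) (l p : List Int),
    2 ≤ i → i ≤ n + 1 → (∀ t ∈ stack, 1 ≤ t ∧ t ≤ n) →
    n + 2 ≤ (lcp.length : Int) → (lpf.length : Int) = n + 1 →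
    pvM SA g i stack lcp lpf = some (j, l, p) →
    j ≤ n + 1 ∧ pvFor SA (PySem.List.pyRange i (n + 2) 1) stack lcp lpf =
      pvFor SA (PySem.List.pyRange j (n + 2) 1) [] l p := by
  intro g
  induction g with
  | zero => intro i stack lcp lpf j l p _ _ _ _ _ h; simp [pvM] at h
  | succ g ih =>
    intro i stack lcp lpf j l p hi hi2 hstk hlcp hlpf h
    cases stack with
    | nil =>
      simp only [pvM] at h
      obtain ⟨rfl, rfl, rfl⟩ : i = j ∧ lcp = l ∧ lpf = p := by cases h; exact ⟨rfl, rfl, rfl⟩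
      exact ⟨hi2, rfl⟩
    | cons t r =>
      obtain ⟨ht1, ht2⟩ := hstk t (List.mem_cons_self)
      obtain ⟨ru, lcp1, lpf1, hu, hl1, hp1, hcase, hsent⟩ :=
        upd_ok n SA lcp lpf i t hlast hrng hlcp hlpf (by omega) hi2 ht1 ht2
      simp only [pvM] at h
      cases ru with
      | some j0 =>
        simp only [hu] at h
        obtain ⟨hj, heq⟩ := ih i r lcp1 lpf1 j l p hi hi2
          (fun t' ht' => hstk t' (List.mem_cons_of_mem _ ht'))
          (by rw [hl1]; exact hlcp) (by rw [hp1]; exact hlpf) h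
        refine ⟨hj, ?_⟩
        have hcons : PySem.List.pyRange i (n+2) 1 = i :: PySem.List.pyRange (i+1) (n+2) 1 :=
          PySem.List.pyRange_one_cons (by omega)
        have hpop : pvPop SA i (t :: r) lcp lpf = pvPop SA i r lcp1 lpf1 := by
          rw [pvPop_step]; simp only [hu]
        rw [hcons] at heq ⊢
        calc pvFor SA (i :: PySem.List.pyRange (i+1) (n+2) 1) (t :: r) lcp lpf
            = pvFor SA (i :: PySem.List.pyRange (i+1) (n+2) 1) r lcp1 lpf1 := by
              simp only [pvFor, hpop]
          _ = _ := heq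
      | none =>
        obtain ⟨heq1, heq2⟩ : lcp1 = lcp ∧ lpf1 = lpf := by
          rcases hcase with hbad | ⟨_, h1, h2⟩
          · exact absurd hbad (by simp)
          · exact ⟨h1, h2⟩
        rw [heq1, heq2] at hu
        have hin : i ≤ n := by
          by_contra hcon
          have hieq : i = n + 1 := by omega
          exact absurd (hsent hieq) (by simp)
        simp only [hu] at h
        obtain ⟨hj, heq⟩ := ih (i+1) (i :: t :: r) lcp lpf j l p (by omega) (by omega)
          (fun t' ht' => by
            rcases List.mem_cons.mp ht' with rfl | ht''
            · exact ⟨by omega, hin⟩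
            · exact hstk t' ht'')
          hlcp hlpf h
        refine ⟨hj, ?_⟩
        rw [PySem.List.pyRange_one_cons (by omega : i < n + 2)]
        have hpop : pvPop SA i (t :: r) lcp lpf = some (t :: r, lcp, lpf) := by
          rw [pvPop_step]; simp only [hu]
        calc pvFor SA (i :: PySem.List.pyRange (i+1) (n+2) 1) (t :: r) lcp lpf
            = pvFor SA (PySem.List.pyRange (i+1) (n+2) 1) (i :: t :: r) lcp lpf := by
              simp only [pvFor, hpop]
          _ = _ := heq

-- A's while loop is B's pass with c pushed on an empty stack.
theorem pvWhile_toB (n : Int) (SA : List Int)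
    (hlast : PySem.List.pyGet? SA (n + 1) = some (-1))
    (hrng : ∀ u : Int, 1 ≤ u → u ≤ n → ∃ v, PySem.List.pyGet? SA u = some v ∧ 0 ≤ v ∧ v ≤ n) :
    ∀ (f : Nat) (c : Int) (lcp lpf : List Int), (n + 2 - c).toNat < f →
    n + 2 ≤ (lcp.length : Int) → (lpf.length : Int) = n + 1 →
    1 ≤ c → c ≤ n + 1 →
    pvWhile n SA f c lcp lpf =
      (pvFor SA (PySem.List.pyRange (c + 1) (n + 2) 1) [c] lcp lpf).map (fun r => r.2.2) := by
  intro f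
  induction f with
  | zero => intro c lcp lpf hf _ _ _ _; omega
  | succ f ih =>
    intro c lcp lpf hf hlcp hlpf hc hc2
    by_cases hcn : c ≤ n
    · obtain ⟨j, l, p, hr, hj1, hj2, hll, hpp⟩ :=
        pvRec_total n SA hlast hrng (n+3).toNat (c+1) c lcp lpf (by omega) hlcp hlpf
          (by omega) (by omega) hc hcn
      obtain ⟨-, g, hg⟩ := pvRec_toM (n+3).toNat (c+1) c lcp lpf j l p (by omega) hr
      obtain ⟨hjn, heq⟩ := pvM_toB n SA hlast hrng g (c+1) [c] lcp lpf j l p (by omega) (by omega)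
        (fun t' ht' => by rcases List.mem_singleton.mp ht' with rfl; exact ⟨hc, hcn⟩)
        hlcp hlpf hg
      have hstep : pvWhile n SA (f+1) c lcp lpf = pvWhile n SA f j l p := by
        simp only [pvWhile, if_pos hcn, hr]
      rw [hstep, heq]
      by_cases hjn2 : j ≤ n
      · rw [PySem.List.pyRange_one_cons (by omega : j < n + 2)]
        have hone : pvFor SA (j :: PySem.List.pyRange (j+1) (n+2) 1) [] l p =
            pvFor SA (PySem.List.pyRange (j+1) (n+2) 1) [j] l p := by
          simp only [pvFor, pvPop]
        rw [hone]
        exact ih j l p (by omega) (by rw [hll]; exact hlcp) (by rw [hpp]; exact hlpf)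
          (by omega) (by omega)
      · have hj : j = n + 1 := by omega
        subst hj
        have hempty : PySem.List.pyRange (n+1+1) (n+2) 1 = [] := by
          have h0 : (n + 2 - (n + 1 + 1)).toNat = 0 := by omega
          rw [PySem.List.pyRange_one, h0]; simp
        rw [PySem.List.pyRange_one_cons (by omega : (n:Int) + 1 < n + 2), hempty]
        cases f with
        | zero => omega
        | succ f' =>
          rw [show pvWhile n SA (f' + 1) (n + 1) l p = some p from by
            simp only [pvWhile]; rw [if_neg (by omega : ¬ (n + 1 ≤ n))]]
          simp [pvFor, pvPop]
    · have hce : c = n + 1 := by omega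
      subst hce
      have hempty : PySem.List.pyRange (n+1+1) (n+2) 1 = [] := by
        have h0 : (n + 2 - (n + 1 + 1)).toNat = 0 := by omega
        rw [PySem.List.pyRange_one, h0]; simp
      rw [hempty]
      simp only [pvWhile]
      rw [if_neg hcn]
      simp [pvFor]

-- ===== VERDICT (by name: the statement is the Claim_ definition above) =====
theorem compute_cis_lpf_no_stack_spec : Claim_equal_compute_cis_lpf_no_stack := by
  intro n SA LCP hdom hpre
  show compute_cis_lpf_no_stack n SA LCP = compute_cis_lpf_no_stack_alt n SA LCP
  rcases hpre with hneg | ⟨hn, hSAlen, hLCPlen, hrange⟩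
  · -- n ≤ 0: A's while loop and B's for loop both run zero iterations.
    unfold compute_cis_lpf_no_stack compute_cis_lpf_no_stack_alt
    simp only []
    have hrange0 : PySem.List.pyRange 2 (n + 2) 1 = [] := by
      have h0 : (n + 2 - 2).toNat = 0 := by omega
      rw [PySem.List.pyRange_one, h0]; simp
    rw [hrange0]
    cases hfe : (n + 2).toNat with
    | zero => simp [pvWhile, pvFor]
    | succ f =>
      have hw : pvWhile n (SA ++ [-1]) (f + 1) 1 (LCP ++ [0])
          (List.replicate (n + 1).toNat (-1)) = some (List.replicate (n + 1).toNat (-1)) := by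
        simp only [pvWhile]; rw [if_neg (by omega : ¬ (1 : Int) ≤ n)]
      rw [hw]
      simp [pvFor]
  have hlast : PySem.List.pyGet? (SA ++ [-1]) (n + 1) = some (-1) := by
    have h1 : (n : Int) + 1 = (SA.length : Int) := hSAlen.symm
    rw [h1]
    exact PySem.List.pyGet?_append_length SA [] (-1)
  have hrng : ∀ u : Int, 1 ≤ u → u ≤ n →
      ∃ v, PySem.List.pyGet? (SA ++ [-1]) u = some v ∧ 0 ≤ v ∧ v ≤ n := by
    intro u h1 h2
    have hlt : u.toNat < SA.length := by omega
    have hlen2 : u < (((SA ++ [-1]).length : Nat) : Int) := by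
      simp only [List.length_append, List.length_cons, List.length_nil]
      push_cast; omega
    refine ⟨(SA ++ [-1])[u.toNat]'(by omega),
      PySem.List.pyGet?_eq_some_getElem _ (by omega) hlen2, ?_⟩
    have happ : (SA ++ [-1])[u.toNat]'(by omega) = SA[u.toNat]'hlt :=
      List.getElem_append_left _
    have hdropmem : SA[u.toNat]'hlt ∈ SA.drop 1 := by
      have h1n : u.toNat - 1 < (SA.drop 1).length := by
        rw [List.length_drop]; omega
      have hdi : (SA.drop 1)[u.toNat - 1]'h1n = SA[1 + (u.toNat - 1)]'(by omega) := List.getElem_drop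
      have : SA[1 + (u.toNat - 1)]'(by omega) = SA[u.toNat]'hlt := by
        congr 1; omega
      rw [this] at hdi
      rw [← hdi]
      exact List.getElem_mem _
    obtain ⟨b1, b2⟩ := hrange _ hdropmem
    rw [happ]
    exact ⟨b1, b2⟩
  have hlcp0 : n + 2 ≤ (((LCP ++ [0]).length : Nat) : Int) := by
    simp only [List.length_append, List.length_cons, List.length_nil]
    push_cast; omega
  have hlpf0 : (((List.replicate (n + 1).toNat (-1) : List Int).length : Nat) : Int) = n + 1 := by
    simp only [List.length_replicate]; omega
  have hmain := pvWhile_toB n (SA ++ [-1]) hlast hrng (n + 2).toNat 1 (LCP ++ [0])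
    (List.replicate (n + 1).toNat (-1)) (by omega) hlcp0 hlpf0 (by omega) (by omega)
  rw [show (1 : Int) + 1 = 2 from by norm_num] at hmain
  unfold compute_cis_lpf_no_stack compute_cis_lpf_no_stack_alt
  simp only []
  rw [hmain]
  cases hf : pvFor (SA ++ [-1]) (PySem.List.pyRange 2 (n + 2) 1) [1] (LCP ++ [0])
      (List.replicate (n + 1).toNat (-1)) with
  | none => simp
  | some res =>
    obtain ⟨s2, l2, p2⟩ := res
    simp
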